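-- pv_equiv track=rewrite | github.com/sundsoffice-tech/luca-nrw-scraper | stream2_extraction_layer/open_data_resolver.py | _clean_domain
-- ===== SOURCE A (Python) =====
-- def _clean_domain(dom: str) -> str:
--     if not dom:
--         return ""
--     d = dom.strip().lower()
--     if d.startswith("www."):
--         d = d[4:]
--     blocked = {
--         "linkedin.com",
--         "de.linkedin.com",
--         "facebook.com",
--         "twitter.com",
--         "x.com",
--         "instagram.com",
--     }
--     if any(d == b or d.endswith("." + b) for b in blocked):
--         return ""
--     return d
-- ===== SOURCE B (Python) =====
-- def _normalize(dom: str) -> str: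
--     d = dom.strip().lower()
--     if d[:4] == "www.":
--         d = d[4:]
--     return d
--
--
-- def _clean_domain(dom: str) -> str:
--     if not dom:
--         return ""
--     d = _normalize(dom)
--     blocked = {
--         "linkedin.com",
--         "de.linkedin.com",
--         "facebook.com",
--         "twitter.com",
--         "x.com",
--         "instagram.com",
--     }
--     if d in blocked:
--         return ""
--     for i, ch in enumerate(d):
--         if ch == "." and d[i + 1:] in blocked:
--             return ""
--     return d
-- ===== Notes on version B (the rewrite author's own statement) =====
-- stated objective: idiomatic
-- what changed: Instead of scanning the fixed blocklist with equality/endswith tests, B walks the normalized domain's characters once and, at each dot, tests whether the remaining suffix is in the blocked set (plus one whole-string membership test), so the traversal subject is the candidate string itself with O(1) set lookups.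
import Mathlib
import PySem

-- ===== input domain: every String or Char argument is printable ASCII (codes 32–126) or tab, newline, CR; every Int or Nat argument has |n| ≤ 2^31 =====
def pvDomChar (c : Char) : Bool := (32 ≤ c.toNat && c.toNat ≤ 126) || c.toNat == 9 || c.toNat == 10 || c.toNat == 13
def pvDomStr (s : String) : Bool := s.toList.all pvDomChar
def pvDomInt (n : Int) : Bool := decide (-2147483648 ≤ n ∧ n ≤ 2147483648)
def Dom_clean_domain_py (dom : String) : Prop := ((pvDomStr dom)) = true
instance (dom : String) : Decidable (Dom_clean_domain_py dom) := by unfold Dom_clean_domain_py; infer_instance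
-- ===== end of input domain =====

-- B replaces A's scan of the blocklist (d==b or endswith('.'+b) for each blocked b) by a single
-- left-to-right walk over the normalized domain itself: at each '.' it looks the remaining suffix
-- up in the blocked set (plus one whole-string lookup) — a suffix walk, not a blocklist scan.

-- the Python set literal of blocked domains (the same literal appears in both sources)
def blockedLits : List String :=
  ["linkedin.com", "de.linkedin.com", "facebook.com", "twitter.com", "x.com", "instagram.com"]

-- ===== PORT A =====
-- `any(... for b in blocked)` iterates a set; the result is a boolean disjunction, hence
-- independent of the set's iteration order — ported as .any over the PySem.Set's element list.
def clean_domain_py (dom : String) : String :=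
  if dom == "" then ""
  else
    let d := PySem.Str.lower (PySem.Str.strip dom)
    let d := if PySem.Str.startswith d "www." then PySem.Str.slice d (some 4) none else d
    let blocked : PySem.Set String := PySem.Set.ofList blockedLits
    if blocked.any (fun b => d == b || PySem.Str.endswith d ("." ++ b)) then "" else d

-- ===== PORT B =====
-- helper _normalize: strip/lower, then drop a leading "www." detected by slicing (d[:4] == "www.")
def normalizeDom (dom : String) : String :=
  let d := PySem.Str.lower (PySem.Str.strip dom)
  if PySem.Str.slice d none (some 4) == "www." then PySem.Str.slice d (some 4) none else d

-- `for i, ch in enumerate(d): if ch == "." and d[i+1:] in blocked: return ""` is an early-exit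
-- loop returning a constant, ported as .any over PySem.List.enumerate of the code points.
def clean_domain_py_alt (dom : String) : String :=
  if dom == "" then ""
  else
    let d := normalizeDom dom
    let blocked : PySem.Set String := PySem.Set.ofList blockedLits
    if blocked.contains d then ""
    else if (PySem.List.enumerate d.toList).any
        (fun p => p.2 == '.' && blocked.contains (PySem.Str.slice d (some (p.1 + 1)) none)) then ""
    else d

-- ===== PRECONDITION & SPEC =====
def Spec_clean_domain_py (dom : String) (out : String) : Prop := out = clean_domain_py_alt dom
instance (dom : String) (out : String) : Decidable (Spec_clean_domain_py dom out) := by unfold Spec_clean_domain_py; infer_instance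

-- ===== CLAIM =====
def Claim_equal_clean_domain_py : Prop := ∀ (dom : String), Dom_clean_domain_py dom → Spec_clean_domain_py dom (clean_domain_py dom)

-- ===== LEMMAS AND PROOFS =====

-- B's slice test d[:4] == "www." coincides with A's startswith test
theorem www_test (d : String) :
    (PySem.Str.slice d none (some 4) == "www.") = PySem.Str.startswith d "www." := by
  rw [Bool.eq_iff_iff, beq_iff_eq, PySem.Str.startswith_eq, PySem.Chars.startswith_iff,
    List.prefix_iff_eq_take]
  constructor
  · intro h
    have := congrArg String.toList h
    rw [PySem.Str.toList_slice, PySem.Chars.slice_eq_listSlice,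
      PySem.List.slice_to d.toList (by norm_num)] at this
    simpa using this.symm
  · intro h
    apply String.toList_inj.mp
    rw [PySem.Str.toList_slice, PySem.Chars.slice_eq_listSlice,
      PySem.List.slice_to d.toList (by norm_num)]
    simpa using h.symm

-- a dotted suffix '.' :: bs of cs is exactly a dot position k with cs.drop (k+1) = bs
theorem suffix_iff (cs bs : List Char) :
    ('.' :: bs <:+ cs) ↔ ∃ k, ∃ _ : k < cs.length, cs[k] = '.' ∧ cs.drop (k + 1) = bs := by
  constructor
  · rintro ⟨u, rfl⟩
    exact ⟨u.length, by simp, by simp, by simp [List.drop_append]⟩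
  · rintro ⟨k, hk, hc, hd⟩
    refine ⟨cs.take k, ?_⟩
    nth_rewrite 2 [← List.take_append_drop k cs]
    congr 1
    rw [← hd, ← hc]
    exact List.getElem_cons_drop hk

-- d[i+1:] (enumerate index i, start 0) as a list drop
theorem slice_toList (d : String) (k : Nat) :
    (PySem.Str.slice d (some ((0:Int) + k + 1)) none).toList = d.toList.drop (k + 1) := by
  rw [PySem.Str.toList_slice, PySem.Chars.slice_eq_listSlice,
    PySem.List.slice_from d.toList (by omega)]
  congr 1
  omega

-- A's blocking disjunction over the set equals B's whole-string test plus dot-walk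
theorem cond_eq (d : String) :
    (PySem.Set.ofList blockedLits).any (fun b => d == b || PySem.Str.endswith d ("." ++ b))
      = ((PySem.Set.ofList blockedLits).contains d
         || (PySem.List.enumerate d.toList).any
              (fun p => p.2 == '.'
                && (PySem.Set.ofList blockedLits).contains
                     (PySem.Str.slice d (some (p.1 + 1)) none))) := by
  rw [Bool.eq_iff_iff]
  simp only [List.any_eq_true, Bool.or_eq_true, beq_iff_eq, Bool.and_eq_true,
    PySem.Set.contains, List.contains_iff_mem, PySem.List.mem_enumerate_iff,
    PySem.Str.endswith_eq, PySem.Chars.endswith_iff]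
  constructor
  · rintro ⟨b, hb, rfl | hsuf⟩
    · exact Or.inl hb
    · rw [show ("." ++ b).toList = '.' :: b.toList by simp, suffix_iff] at hsuf
      obtain ⟨k, hk, hc, hdrop⟩ := hsuf
      refine Or.inr ⟨((0:Int) + k, d.toList[k]), ⟨k, hk, rfl⟩, by simpa using hc, ?_⟩
      have : PySem.Str.slice d (some ((0:Int) + k + 1)) none = b :=
        String.toList_inj.mp (by rw [slice_toList, hdrop])
      rw [this]; exact hb
  · rintro (hd | ⟨p, ⟨k, hk, rfl⟩, hc, hmem⟩)
    · exact ⟨d, hd, Or.inl rfl⟩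
    · refine ⟨_, hmem, Or.inr ?_⟩
      rw [show ("." ++ PySem.Str.slice d (some ((0:Int) + ↑k + 1)) none).toList
            = '.' :: (PySem.Str.slice d (some ((0:Int) + ↑k + 1)) none).toList by simp,
        suffix_iff]
      exact ⟨k, hk, by simpa using hc, by rw [slice_toList]⟩

-- splitting an 'if a || b' into B's two early returns
theorem if_or_split {alpha : Type} (a b : Bool) (x y : alpha) :
    (if a || b then x else y) = if a then x else if b then x else y := by
  cases a <;> cases b <;> simp

-- the two blocking stages produce the same result for any normalized d
theorem tail_eq (d : String) :
    (if (PySem.Set.ofList blockedLits).any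
          (fun b => d == b || PySem.Str.endswith d ("." ++ b)) then "" else d)
      = (if (PySem.Set.ofList blockedLits).contains d then ""
         else if (PySem.List.enumerate d.toList).any
             (fun p => p.2 == '.'
               && (PySem.Set.ofList blockedLits).contains
                    (PySem.Str.slice d (some (p.1 + 1)) none)) then ""
         else d) := by
  rw [cond_eq, if_or_split]

-- ===== VERDICT =====
theorem clean_domain_py_spec : Claim_equal_clean_domain_py := by
  intro dom _
  unfold Spec_clean_domain_py clean_domain_py clean_domain_py_alt normalizeDom
  simp only [www_test]
  by_cases h : dom == "" <;> simp only [h, Bool.false_eq_true, if_true, if_false]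
  exact tail_eq _
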